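-- pv_equiv track=rewrite | github.com/cakemus/Discrete-Mathematics-IX1500 | proj1_3.2.py | ul_to_coords
-- ===== SOURCE A (Python) =====
-- def L(m, n):
--     return (m+1, n-1)
--
-- def U(m, n):
--     return (m+1, n+1)
--
-- def ul_to_coords(path):
--     """
--     Simulates the path based on the sequence of moves ('U' and 'L')
--     and returns the list of coordinates.
--     """
--     #start at (0, 0)
--     x, y = 0, 0
--     coordinates = [(x, y)]  #start coordinate
--
--     #apply each move in the path
--     for move in path:
--         if move == 'U':
--             x, y = U(x, y)  #use U function to move up
--         elif move == 'L':
--             x, y = L(x, y)  #use L function to move down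
--         coordinates.append((x, y))  #add the new coordinates
--
--     return coordinates
-- ===== SOURCE B (Python) =====
-- def ul_to_coords(path):
--     """Divide and conquer: the trajectory of a path is the trajectory of its
--     first half, followed by the trajectory of its second half translated by
--     the first half's endpoint (the right half's leading origin is dropped)."""
--     def coords(s):
--         n = len(s)
--         if n == 0:
--             return [(0, 0)]
--         if n == 1:
--             if s == 'U':
--                 return [(0, 0), (1, 1)]
--             if s == 'L':
--                 return [(0, 0), (1, -1)]
--             return [(0, 0), (0, 0)]
--         k = n // 2
--         left = coords(s[:k])
--         right = coords(s[k:])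
--         ax, ay = left[-1]
--         return left + [(x + ax, y + ay) for x, y in right[1:]]
--     return coords(path)
-- ===== Notes on version B (the rewrite author's own statement) =====
-- stated objective: alternative
-- what changed: Replaces the left-to-right mutating position loop with a divide-and-conquer: split the path in half, recursively build each half's trajectory, and combine by translating the right trajectory (minus its leading origin) by the left trajectory's endpoint; correct because a trajectory is translation-equivariant in its start point.
import Mathlib
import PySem

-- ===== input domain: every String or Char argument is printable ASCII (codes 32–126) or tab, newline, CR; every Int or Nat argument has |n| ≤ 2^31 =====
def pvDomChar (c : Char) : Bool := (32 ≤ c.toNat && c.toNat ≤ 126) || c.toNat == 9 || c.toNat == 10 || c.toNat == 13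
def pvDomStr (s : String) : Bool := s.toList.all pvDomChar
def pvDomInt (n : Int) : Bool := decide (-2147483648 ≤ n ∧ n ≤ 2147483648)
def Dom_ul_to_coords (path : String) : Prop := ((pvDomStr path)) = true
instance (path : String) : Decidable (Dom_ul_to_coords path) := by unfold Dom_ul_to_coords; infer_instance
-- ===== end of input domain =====

-- B builds the trajectory by divide and conquer (halve the path, translate the right half's trajectory by the left endpoint) instead of a left-to-right mutating position loop; alternative decomposition, not claimed faster.
-- ===== PORT A =====
def pyU (m n : Int) : Int × Int := (m + 1, n + 1)

def pyL (m n : Int) : Int × Int := (m + 1, n - 1)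

def ulLoop : List Char → Int → Int → List (Int × Int) → List (Int × Int)
  | [], _, _, coordinates => coordinates
  | move :: rest, x, y, coordinates =>
    let p := if move = 'U' then pyU x y else if move = 'L' then pyL x y else (x, y)
    ulLoop rest p.1 p.2 (coordinates ++ [p])

def ul_to_coords (path : String) : List (Int × Int) :=
  ulLoop path.toList 0 0 [((0 : Int), (0 : Int))]

-- ===== PORT B =====
def ulDC : List Char → List (Int × Int)
  | [] => [((0 : Int), (0 : Int))]
  | [c] => [(0, 0), if c = 'U' then (1, 1) else if c = 'L' then (1, -1) else (0, 0)]
  | c1 :: c2 :: rest =>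
    let k := (c1 :: c2 :: rest).length / 2
    let left := ulDC ((c1 :: c2 :: rest).take k)
    let right := ulDC ((c1 :: c2 :: rest).drop k)
    let a := left.getLastD (0, 0)   -- left[-1]; the recursion always returns a nonempty list
    left ++ right.tail.map (fun p => (p.1 + a.1, p.2 + a.2))
  termination_by cs => cs.length
  decreasing_by all_goals (simp [List.length_take, List.length_drop]; omega)

def ul_to_coords_alt (path : String) : List (Int × Int) :=
  ulDC path.toList

-- ===== PRECONDITION & SPEC =====
def Spec_ul_to_coords (path : String) (out : List (Int × Int)) : Prop := out = ul_to_coords_alt path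
instance (path : String) (out : List (Int × Int)) : Decidable (Spec_ul_to_coords path out) := by unfold Spec_ul_to_coords; infer_instance

-- ===== CLAIM (what is proved, stated in full; the proofs are below) =====
def Claim_equal_ul_to_coords : Prop := ∀ (path : String), Dom_ul_to_coords path → Spec_ul_to_coords path (ul_to_coords path)

-- ===== LEMMAS AND PROOFS =====

-- the per-move displacement and translation of a trajectory, used only by the proofs
def ulDelta (c : Char) : Int × Int :=
  if c = 'U' then (1, 1) else if c = 'L' then (1, -1) else (0, 0)

def ulShift (a : Int × Int) (l : List (Int × Int)) : List (Int × Int) :=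
  l.map (fun p => (p.1 + a.1, p.2 + a.2))

-- recursive characterisation of the trajectory
def ulG : List Char → List (Int × Int)
  | [] => [((0 : Int), (0 : Int))]
  | c :: cs => ((0 : Int), (0 : Int)) :: ulShift (ulDelta c) (ulG cs)

lemma ulG_head (cs : List Char) : ulG cs = ((0 : Int), (0 : Int)) :: (ulG cs).tail := by
  cases cs <;> simp [ulG]

lemma ulG_ne_nil (cs : List Char) : ulG cs ≠ [] := by
  cases cs <;> simp [ulG]

lemma ulShift_zero (l : List (Int × Int)) : ulShift (0, 0) l = l := by
  simp [ulShift]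

lemma getLastD_congr (l : List (Int × Int)) (h : l ≠ []) (d d' : Int × Int) :
    l.getLastD d = l.getLastD d' := by
  cases hl : l.getLast? with
  | none => exact absurd (List.getLast?_eq_none_iff.mp hl) h
  | some z => simp [List.getLastD_eq_getLast?, hl]

lemma ulShift_getLastD (a d : Int × Int) (l : List (Int × Int)) :
    (ulShift a l).getLastD (d.1 + a.1, d.2 + a.2)
      = ((l.getLastD d).1 + a.1, (l.getLastD d).2 + a.2) := by
  induction l generalizing d with
  | nil => simp [ulShift]
  | cons x t ih =>
    simp only [ulShift, List.map_cons, List.getLastD_cons]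
    exact ih x

lemma ulG_last (c : Char) (cs : List Char) :
    (ulG (c :: cs)).getLastD (0, 0)
      = (((ulG cs).getLastD (0, 0)).1 + (ulDelta c).1,
         ((ulG cs).getLastD (0, 0)).2 + (ulDelta c).2) := by
  rw [show ulG (c :: cs) = ((0 : Int), (0 : Int)) :: ulShift (ulDelta c) (ulG cs) from rfl]
  rw [List.getLastD_cons]
  rw [getLastD_congr _ (by simp [ulShift, ulG_ne_nil]) _
      (((0 : Int), (0 : Int)).1 + (ulDelta c).1, ((0 : Int), (0 : Int)).2 + (ulDelta c).2)]
  exact ulShift_getLastD (ulDelta c) (0, 0) (ulG cs)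

lemma ulG_append (u v : List Char) :
    ulG (u ++ v) = ulG u ++ ulShift ((ulG u).getLastD (0, 0)) (ulG v).tail := by
  induction u with
  | nil =>
    simp [ulG, ulShift_zero]
    exact ulG_head v
  | cons c u' ih =>
    show ((0:Int),(0:Int)) :: ulShift (ulDelta c) (ulG (u' ++ v)) = _
    rw [ih]
    simp only [ulShift, List.map_append]
    rw [ulG_last c u']
    show _ = (((0:Int),(0:Int)) :: ulShift (ulDelta c) (ulG u')) ++ _
    simp only [ulShift, List.cons_append, List.map_map]
    congr 2
    apply List.map_congr_left; intro p _
    simp [Function.comp]; exact ⟨by ring, by ring⟩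

lemma ulDC_eq_ulG (cs : List Char) : ulDC cs = ulG cs := by
  induction cs using ulDC.induct with
  | case1 => simp [ulDC, ulG]
  | case2 c =>
    simp only [ulDC, ulG, ulShift, List.map_cons, List.map_nil, ulDelta]
    split_ifs <;> simp
  | case3 c1 c2 rest k ihl ihr =>
    rw [ulDC]
    rw [ihl, ihr]
    have := ulG_append ((c1 :: c2 :: rest).take k)
                       ((c1 :: c2 :: rest).drop k)
    rw [List.take_append_drop] at this
    rw [this]
    rfl

lemma ulLoop_eq (cs : List Char) (x y : Int) (acc : List (Int × Int)) :
    ulLoop cs x y acc = acc ++ (ulG cs).tail.map (fun p => (p.1 + x, p.2 + y)) := by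
  induction cs generalizing x y acc with
  | nil => simp [ulLoop, ulG]
  | cons c rest ih =>
    simp only [ulLoop]
    rw [ih]
    have h := ulG_head rest
    by_cases hU : c = 'U'
    · simp [hU, ulG, ulShift, ulDelta, pyU]
      rw [h]
      simp [Function.comp]
      refine ⟨⟨by ring, by ring⟩, ?_⟩
      congr 1
      apply List.map_congr_left; intro p _
      simp [Function.comp]; exact ⟨by ring, by ring⟩
    · by_cases hL : c = 'L'
      · simp [hL, ulG, ulShift, ulDelta, pyL]
        rw [h]
        simp [Function.comp]
        refine ⟨⟨by ring, by ring⟩, ?_⟩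
        congr 1
        apply List.map_congr_left; intro p _
        simp [Function.comp]; exact ⟨by ring, by ring⟩
      · rw [if_neg hU, if_neg hL]
        simp only [ulG, ulShift, ulDelta, if_neg hU, if_neg hL]
        rw [h]
        simp

-- ===== VERDICT (by name: the statement is the Claim_ definition above) =====
theorem ul_to_coords_spec : Claim_equal_ul_to_coords := by
  intro path _
  unfold Spec_ul_to_coords ul_to_coords ul_to_coords_alt
  rw [ulLoop_eq, ulDC_eq_ulG]
  conv_rhs => rw [ulG_head]
  simp
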